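-- pv_equiv track=rewrite | github.com/Robertg761/netguardian | network_topology.py | _determine_node_type
-- ===== SOURCE A (Python) =====
-- from typing import Dict, List, Any, Optional, Tuple
--
-- def _determine_node_type(host: Dict[str, Any]) -> str:
--     """Determine the type of network node based on services."""
--     services = host.get('services', [])
--     ports = host.get('ports', [])
--
--     # Check for specific service patterns
--     service_names = [s.get('service', '').lower() for s in ports]
--
--     if any('http' in s or 'https' in s for s in service_names):
--         return 'server'
--     elif any('ssh' in s or 'rdp' in s or 'vnc' in s for s in service_names):
--         return 'workstation'
--     elif any('smtp' in s or 'pop' in s or 'imap' in s for s in service_names):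
--         return 'mail_server'
--     elif any('dns' in s for s in service_names):
--         return 'dns_server'
--     elif any('ftp' in s or 'smb' in s for s in service_names):
--         return 'file_server'
--     elif any('sql' in s or 'mysql' in s or 'postgres' in s for s in service_names):
--         return 'database'
--     elif len(ports) > 10:
--         return 'server'
--     else:
--         return 'host'
-- ===== SOURCE B (Python) =====
-- # Transposed classification: each port is classified to its own best rule
-- # index (first matched rule), and a min-reduce over ports picks the winner.
-- _RULES = [
--     (('http', 'https'), 'server'),
--     (('ssh', 'rdp', 'vnc'), 'workstation'),
--     (('smtp', 'pop', 'imap'), 'mail_server'),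
--     (('dns',), 'dns_server'),
--     (('ftp', 'smb'), 'file_server'),
--     (('sql', 'mysql', 'postgres'), 'database'),
-- ]
--
-- def _classify(name):
--     for i, (keys, _) in enumerate(_RULES):
--         if any(k in name for k in keys):
--             return i
--     return len(_RULES)
--
-- def _determine_node_type(host):
--     ports = host.get('ports', [])
--     best = min((_classify(p.get('service', '').lower()) for p in ports),
--                default=len(_RULES))
--     if best < len(_RULES):
--         return _RULES[best][1]
--     return 'server' if len(ports) > 10 else 'host'
-- ===== Notes on version B (the rewrite author's own statement) =====
-- stated objective: alternative
-- what changed: Transposes the computation: instead of six sequential any()-scans over all service names (one per category), each port is classified independently to its own first-matching rule index and a single min-reduce over ports picks the highest-priority category, with the len>10 fallback when no port matches.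
import Mathlib
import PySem

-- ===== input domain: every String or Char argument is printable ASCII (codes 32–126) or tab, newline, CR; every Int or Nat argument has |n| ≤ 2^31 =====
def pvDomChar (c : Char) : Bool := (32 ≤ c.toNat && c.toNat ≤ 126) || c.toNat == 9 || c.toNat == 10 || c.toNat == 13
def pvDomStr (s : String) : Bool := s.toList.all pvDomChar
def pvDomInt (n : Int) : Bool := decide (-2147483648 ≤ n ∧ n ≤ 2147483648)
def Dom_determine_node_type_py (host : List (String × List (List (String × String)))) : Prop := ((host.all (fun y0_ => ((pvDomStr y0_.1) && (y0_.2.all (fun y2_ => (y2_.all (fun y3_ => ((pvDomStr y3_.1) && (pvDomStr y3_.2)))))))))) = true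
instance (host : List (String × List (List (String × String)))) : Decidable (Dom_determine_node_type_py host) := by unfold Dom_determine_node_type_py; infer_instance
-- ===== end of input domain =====

-- B transposes the computation: each port is classified to its first-matching
-- rule index and a min-reduce over ports picks the winning category (alternative).

-- ===== PORT A =====
def determine_node_type_py (host : List (String × List (List (String × String)))) : String :=
  let _services := PySem.Dict.getD (PySem.Dict.mk host) "services" []
  let ports := PySem.Dict.getD (PySem.Dict.mk host) "ports" []
  let service_names := ports.map (fun s => PySem.Str.lower (PySem.Dict.getD (PySem.Dict.mk s) "service" ""))
  if service_names.any (fun s => PySem.Str.isIn "http" s || PySem.Str.isIn "https" s) then "server"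
  else if service_names.any (fun s => PySem.Str.isIn "ssh" s || PySem.Str.isIn "rdp" s || PySem.Str.isIn "vnc" s) then "workstation"
  else if service_names.any (fun s => PySem.Str.isIn "smtp" s || PySem.Str.isIn "pop" s || PySem.Str.isIn "imap" s) then "mail_server"
  else if service_names.any (fun s => PySem.Str.isIn "dns" s) then "dns_server"
  else if service_names.any (fun s => PySem.Str.isIn "ftp" s || PySem.Str.isIn "smb" s) then "file_server"
  else if service_names.any (fun s => PySem.Str.isIn "sql" s || PySem.Str.isIn "mysql" s || PySem.Str.isIn "postgres" s) then "database"
  else if ports.length > 10 then "server"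
  else "host"

-- ===== PORT B =====
-- Source B's rule table (keywords, label)
def ntRules : List (List String × String) :=
  [(["http", "https"], "server"),
   (["ssh", "rdp", "vnc"], "workstation"),
   (["smtp", "pop", "imap"], "mail_server"),
   (["dns"], "dns_server"),
   (["ftp", "smb"], "file_server"),
   (["sql", "mysql", "postgres"], "database")]

-- one port dict: its lowered service name
def ntName (p : List (String × String)) : String :=
  PySem.Str.lower (PySem.Dict.getD (PySem.Dict.mk p) "service" "")

-- Source B's _classify: index of the first rule whose keywords match, else len(_RULES)
def ntClassify (name : String) : Nat :=
  ntRules.findIdx (fun r => r.1.any (fun k => PySem.Str.isIn k name))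

def determine_node_type_py_alt (host : List (String × List (List (String × String)))) : String :=
  let ports := PySem.Dict.getD (PySem.Dict.mk host) "ports" []
  -- min(..., default=len(_RULES)): fold of Nat.min starting at the default
  let best := (ports.map (fun p => ntClassify (ntName p))).foldl Nat.min ntRules.length
  if best < ntRules.length then (ntRules.getD best ([], "")).2
  else if ports.length > 10 then "server" else "host"

-- ===== PRECONDITION & SPEC =====
def Spec_determine_node_type_py (host : List (String × List (List (String × String)))) (out : String) : Prop := out = determine_node_type_py_alt host
instance (host : List (String × List (List (String × String)))) (out : String) : Decidable (Spec_determine_node_type_py host out) := by unfold Spec_determine_node_type_py; infer_instance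

-- ===== CLAIM (what is proved, stated in full; the proofs are below) =====
def Claim_equal_determine_node_type_py : Prop := ∀ (host : List (String × List (List (String × String)))), Dom_determine_node_type_py host → Spec_determine_node_type_py host (determine_node_type_py host)

-- ===== LEMMAS AND PROOFS =====

-- the priority index chosen by six match flags
def ntG (a0 a1 a2 a3 a4 a5 : Bool) : Nat :=
  if a0 then 0 else if a1 then 1 else if a2 then 2 else if a3 then 3
  else if a4 then 4 else if a5 then 5 else 6

-- _classify's first-match index, written through the six flags
theorem ntClassify_eq (name : String) :
    ntClassify name =
      ntG (PySem.Str.isIn "http" name || PySem.Str.isIn "https" name)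
          (PySem.Str.isIn "ssh" name || PySem.Str.isIn "rdp" name || PySem.Str.isIn "vnc" name)
          (PySem.Str.isIn "smtp" name || PySem.Str.isIn "pop" name || PySem.Str.isIn "imap" name)
          (PySem.Str.isIn "dns" name)
          (PySem.Str.isIn "ftp" name || PySem.Str.isIn "smb" name)
          (PySem.Str.isIn "sql" name || PySem.Str.isIn "mysql" name || PySem.Str.isIn "postgres" name) := by
  simp only [ntClassify, ntRules, ntG, List.findIdx, List.findIdx.go, List.any_cons,
    List.any_nil, Bool.or_false, Bool.or_assoc]
  generalize (PySem.Str.isIn "http" name || PySem.Str.isIn "https" name) = a0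
  generalize (PySem.Str.isIn "ssh" name || (PySem.Str.isIn "rdp" name || PySem.Str.isIn "vnc" name)) = a1
  generalize (PySem.Str.isIn "smtp" name || (PySem.Str.isIn "pop" name || PySem.Str.isIn "imap" name)) = a2
  generalize (PySem.Str.isIn "dns" name) = a3
  generalize (PySem.Str.isIn "ftp" name || PySem.Str.isIn "smb" name) = a4
  generalize (PySem.Str.isIn "sql" name || (PySem.Str.isIn "mysql" name || PySem.Str.isIn "postgres" name)) = a5
  cases a0 <;> cases a1 <;> cases a2 <;> cases a3 <;> cases a4 <;> cases a5 <;> rfl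

-- min of two priority indices is the priority index of the joined flags
theorem ntG_min (b0 b1 b2 b3 b4 b5 a0 a1 a2 a3 a4 a5 : Bool) :
    Nat.min (ntG b0 b1 b2 b3 b4 b5) (ntG a0 a1 a2 a3 a4 a5) =
      ntG (b0 || a0) (b1 || a1) (b2 || a2) (b3 || a3) (b4 || a4) (b5 || a5) := by
  cases b0 <;> cases b1 <;> cases b2 <;> cases b3 <;> cases b4 <;> cases b5 <;>
    cases a0 <;> cases a1 <;> cases a2 <;> cases a3 <;> cases a4 <;> cases a5 <;> rfl

-- pulling an element out of a left fold of min
theorem foldl_min_acc (l : List Nat) : ∀ (a b : Nat),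
    l.foldl Nat.min (Nat.min a b) = Nat.min a (l.foldl Nat.min b) := by
  induction l with
  | nil => intro a b; rfl
  | cons c cs ih =>
    intro a b
    simp only [List.foldl_cons]
    rw [show Nat.min (Nat.min a b) c = Nat.min a (Nat.min b c) from by simp [Nat.min_def]; split_ifs <;> omega, ih]

-- the min-reduce over ports equals the priority index of the per-category anys
theorem ntBest (ports : List (List (String × String))) :
    (ports.map (fun p => ntClassify (ntName p))).foldl Nat.min 6 =
      ntG (ports.any fun p => PySem.Str.isIn "http" (ntName p) || PySem.Str.isIn "https" (ntName p))
          (ports.any fun p => PySem.Str.isIn "ssh" (ntName p) || PySem.Str.isIn "rdp" (ntName p) || PySem.Str.isIn "vnc" (ntName p))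
          (ports.any fun p => PySem.Str.isIn "smtp" (ntName p) || PySem.Str.isIn "pop" (ntName p) || PySem.Str.isIn "imap" (ntName p))
          (ports.any fun p => PySem.Str.isIn "dns" (ntName p))
          (ports.any fun p => PySem.Str.isIn "ftp" (ntName p) || PySem.Str.isIn "smb" (ntName p))
          (ports.any fun p => PySem.Str.isIn "sql" (ntName p) || PySem.Str.isIn "mysql" (ntName p) || PySem.Str.isIn "postgres" (ntName p)) := by
  induction ports with
  | nil => rfl
  | cons p ps ih =>
    simp only [List.map_cons, List.foldl_cons, List.any_cons]
    rw [show Nat.min 6 (ntClassify (ntName p)) = Nat.min (ntClassify (ntName p)) 6 from Nat.min_comm _ _,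
        foldl_min_acc, ih, ntClassify_eq, ntG_min]

-- the if-chain over the anys equals B's index lookup / fallback
theorem ntResolve (a0 a1 a2 a3 a4 a5 : Bool) (n : Nat) :
    (if a0 then "server"
     else if a1 then "workstation"
     else if a2 then "mail_server"
     else if a3 then "dns_server"
     else if a4 then "file_server"
     else if a5 then "database"
     else if n > 10 then "server" else "host") =
    (if ntG a0 a1 a2 a3 a4 a5 < ntRules.length then (ntRules.getD (ntG a0 a1 a2 a3 a4 a5) ([], "")).2
     else if n > 10 then "server" else "host") := by
  cases a0 <;> cases a1 <;> cases a2 <;> cases a3 <;> cases a4 <;> cases a5 <;> rfl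

-- ===== VERDICT (by name: the statement is the Claim_ definition above) =====
theorem determine_node_type_py_spec : Claim_equal_determine_node_type_py := by
  intro host _
  show determine_node_type_py host = determine_node_type_py_alt host
  unfold determine_node_type_py determine_node_type_py_alt
  simp only [List.any_map]
  rw [show (ntRules.length : Nat) = 6 from rfl, ntBest]
  simp only [ntName, Function.comp_def, Bool.or_assoc]
  exact ntResolve _ _ _ _ _ _ _
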